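-- pv_equiv track=rewrite | github.com/w3slley/covid19-portugal-wikipedia | sample/report.py | add_comma
-- ===== SOURCE A (Python) =====
-- def add_comma(number: str):
--     n = len(number)
--     pos = []
--     ans = ''
--     i=1
--     while n-i*3>0:
--         pos.append(n-i*3-1)
--         i+=1
--     for j in range(n):
--         ans+=str(number[j])
--         if j in pos:
--             ans+=','
--     return ans
-- ===== SOURCE B (Python) =====
-- def add_comma(number: str):
--     chunks = []
--     s = number
--     while len(s) > 3:
--         g = len(s) % 3 or 3
--         chunks.append(s[:g])
--         s = s[g:]
--     chunks.append(s)
--     return ','.join(chunks)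
-- ===== Notes on version B (the rewrite author's own statement) =====
-- stated objective: simpler
-- what changed: A precomputes a list of comma positions with a while-loop and then walks the string char-by-char testing membership in that list; B peels the leading digit group (len % 3 or 3) off the front with slices in a single while-loop and joins the chunks with ','.
import Mathlib
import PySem

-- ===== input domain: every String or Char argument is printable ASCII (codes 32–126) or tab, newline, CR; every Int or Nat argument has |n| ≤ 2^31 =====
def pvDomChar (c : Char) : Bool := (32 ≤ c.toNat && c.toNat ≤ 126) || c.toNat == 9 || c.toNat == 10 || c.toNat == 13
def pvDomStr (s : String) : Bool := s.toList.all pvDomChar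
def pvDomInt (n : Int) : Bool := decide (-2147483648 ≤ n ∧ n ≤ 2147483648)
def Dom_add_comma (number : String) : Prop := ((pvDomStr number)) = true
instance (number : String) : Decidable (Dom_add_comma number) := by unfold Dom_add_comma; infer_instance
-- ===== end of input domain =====

-- B replaces A's precomputed comma-position list and char-by-char walk by peeling digit
-- groups off the front with slices and joining them with ','  (objective: simpler).

-- ===== PORT A =====
-- while n-i*3>0: pos.append(n-i*3-1); i+=1
def posLoop (n i : Int) (acc : List Int) : List Int :=
  if _h : n - i * 3 > 0 then posLoop n (i + 1) (acc ++ [n - i * 3 - 1]) else acc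
termination_by (n - i * 3).toNat
decreasing_by omega

-- for j in range(n): ans += str(number[j]); if j in pos: ans += ','
-- (j runs over range(len(number)), so number[j] never raises; pyGetD is exact here)
def add_comma (number : String) : String :=
  String.ofList ((PySem.List.pyRange 0 (number.toList.length : Int) 1).foldl
    (fun ans j => ans ++ ([PySem.List.pyGetD number.toList j ' '] ++
      (if j ∈ posLoop (number.toList.length : Int) 1 [] then [','] else []))) [])

-- ===== PORT B =====
-- while len(s) > 3: g = len(s) % 3 or 3; chunks.append(s[:g]); s = s[g:]
-- (s[:g]/s[g:] with the Nat bound g are exactly take/drop: PySem.List.slice_to_natCast /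
--  slice_from_natCast; 'len(s) % 3 or 3' is the if-expression below, written out at each use)
def chunkLoop (s : List Char) (chunks : List (List Char)) : List (List Char) :=
  if _h : 3 < s.length then
    chunkLoop (s.drop (if s.length % 3 = 0 then 3 else s.length % 3))
      (chunks ++ [s.take (if s.length % 3 = 0 then 3 else s.length % 3)])
  else chunks ++ [s]
termination_by s.length
decreasing_by simp only [List.length_drop]; split <;> omega

-- return ','.join(chunks)
def add_comma_alt (number : String) : String :=
  String.ofList (List.intercalate [','] (chunkLoop number.toList []))

-- ===== PRECONDITION & SPEC =====
def Spec_add_comma (number : String) (out : String) : Prop := out = add_comma_alt number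
instance (number : String) (out : String) : Decidable (Spec_add_comma number out) := by unfold Spec_add_comma; infer_instance

-- ===== CLAIM (what is proved, stated in full; the proofs are below) =====
def Claim_equal_add_comma : Prop := ∀ (number : String), Dom_add_comma number → Spec_add_comma number (add_comma number)

-- ===== LEMMAS AND PROOFS =====

-- A's character stream, with the membership test 'j in pos' replaced by its arithmetic meaning.
def aChars (cs : List Char) : List Char :=
  (PySem.List.pyRange 0 (cs.length : Int) 1).flatMap
    (fun j => [PySem.List.pyGetD cs j ' '] ++
      (if 3 ≤ (cs.length : Int) - 1 - j ∧ ((cs.length : Int) - 1 - j) % 3 = 0 then [','] else []))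

theorem mem_posLoop (n i : Int) (acc : List Int) (j : Int) :
    j ∈ posLoop n i acc ↔ j ∈ acc ∨ ∃ k : Int, i ≤ k ∧ 0 < n - k * 3 ∧ j = n - k * 3 - 1 := by
  rw [posLoop]
  by_cases h : n - i * 3 > 0
  · rw [dif_pos h, mem_posLoop n (i + 1) (acc ++ [n - i * 3 - 1]) j]
    constructor
    · rintro (hj | ⟨k, hk1, hk2, hk3⟩)
      · rcases List.mem_append.mp hj with h1 | h1
        · exact Or.inl h1
        · exact Or.inr ⟨i, le_refl i, h, by simpa using h1⟩
      · exact Or.inr ⟨k, by omega, hk2, hk3⟩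
    · rintro (hj | ⟨k, hk1, hk2, hk3⟩)
      · exact Or.inl (List.mem_append.mpr (Or.inl hj))
      · by_cases hki : k = i
        · subst hki; exact Or.inl (List.mem_append.mpr (Or.inr (by simp [hk3])))
        · exact Or.inr ⟨k, by omega, hk2, hk3⟩
  · rw [dif_neg h]
    constructor
    · exact Or.inl
    · rintro (hj | ⟨k, hk1, hk2, _⟩)
      · exact hj
      · exfalso; omega
termination_by (n - i * 3).toNat
decreasing_by omega

theorem mem_pos_iff (n j : Int) :
    j ∈ posLoop n 1 [] ↔ 0 ≤ j ∧ 3 ≤ n - 1 - j ∧ (n - 1 - j) % 3 = 0 := by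
  rw [mem_posLoop]
  constructor
  · rintro (h | ⟨k, hk1, hk2, hk3⟩)
    · simp at h
    · refine ⟨by omega, by omega, by omega⟩
  · rintro ⟨h0, h1, h2⟩
    exact Or.inr ⟨(n - 1 - j) / 3, by omega, by omega, by omega⟩

theorem add_comma_eq_aChars (number : String) :
    add_comma number = String.ofList (aChars number.toList) := by
  unfold add_comma aChars
  rw [PySem.List.foldl_append_eq_flatMap]
  rw [List.nil_append]
  congr 1
  apply List.flatMap_congr
  intro j hj
  have hj' := PySem.List.mem_pyRange_one.mp hj
  congr 1
  have hcond : (j ∈ posLoop (number.toList.length : Int) 1 []) ↔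
      (3 ≤ (number.toList.length : Int) - 1 - j ∧ ((number.toList.length : Int) - 1 - j) % 3 = 0) := by
    rw [mem_pos_iff]; omega
  exact if_congr hcond rfl rfl

theorem flatMap_singleton_eq_map {α β : Type} (l : List α) (f : α → β) :
    l.flatMap (fun x => [f x]) = l.map f := by
  induction l with
  | nil => rfl
  | cons x t ih => simp [ih]

-- (pyRange 0 m).map (fun j => cs[j]) is the prefix cs.take m
theorem map_pyGetD_take (cs : List Char) (d : Char) (m : Nat) (hm : m ≤ cs.length) :
    (PySem.List.pyRange 0 (m : Int) 1).map (fun j => PySem.List.pyGetD cs j d) = cs.take m := by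
  rw [PySem.List.pyRange_zero_natCast, List.map_map]
  apply List.ext_getElem
  · simp [hm]
  · intro k h1 h2
    have hk : k < cs.length := by simp at h1; omega
    simp only [List.getElem_map, List.getElem_range, Function.comp_apply, List.getElem_take]
    rw [PySem.List.pyGetD_natCast, List.getD_eq_getElem _ _ hk]

theorem chunkLoop_step (s : List Char) (acc : List (List Char)) (h : 3 < s.length) :
    chunkLoop s acc = chunkLoop (s.drop (if s.length % 3 = 0 then 3 else s.length % 3))
      (acc ++ [s.take (if s.length % 3 = 0 then 3 else s.length % 3)]) := by
  conv_lhs => rw [chunkLoop]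
  rw [dif_pos h]

theorem chunkLoop_last (s : List Char) (acc : List (List Char)) (h : ¬ 3 < s.length) :
    chunkLoop s acc = acc ++ [s] := by
  conv_lhs => rw [chunkLoop]
  rw [dif_neg h]

theorem chunkLoop_acc (s : List Char) (acc : List (List Char)) :
    chunkLoop s acc = acc ++ chunkLoop s [] := by
  by_cases h : 3 < s.length
  · rw [chunkLoop_step s acc h, chunkLoop_step s [] h,
      chunkLoop_acc (s.drop (if s.length % 3 = 0 then 3 else s.length % 3))
        (acc ++ [s.take (if s.length % 3 = 0 then 3 else s.length % 3)]),
      chunkLoop_acc (s.drop (if s.length % 3 = 0 then 3 else s.length % 3))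
        ([] ++ [s.take (if s.length % 3 = 0 then 3 else s.length % 3)])]
    simp
  · rw [chunkLoop_last s acc h, chunkLoop_last s [] h]
    simp
termination_by s.length
decreasing_by all_goals (simp only [List.length_drop]; split <;> omega)

theorem chunkLoop_nil_ne_nil (s : List Char) : chunkLoop s [] ≠ [] := by
  by_cases h : 3 < s.length
  · rw [chunkLoop_step s [] h, chunkLoop_acc]
    simp
  · rw [chunkLoop_last s [] h]
    simp

theorem intercalate_comma_cons (x : List Char) (xs : List (List Char)) (h : xs ≠ []) :
    List.intercalate [','] (x :: xs) = x ++ ',' :: List.intercalate [','] xs := by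
  cases xs with
  | nil => exact absurd rfl h
  | cons y t => simp [List.intercalate]

theorem intercalate_comma_single (x : List Char) : List.intercalate [','] [x] = x := by
  simp [List.intercalate]

theorem aChars_small (cs : List Char) (h : cs.length ≤ 3) : aChars cs = cs := by
  unfold aChars
  have h1 : (PySem.List.pyRange 0 (cs.length : Int) 1).flatMap
      (fun j => [PySem.List.pyGetD cs j ' '] ++
        (if 3 ≤ (cs.length : Int) - 1 - j ∧ ((cs.length : Int) - 1 - j) % 3 = 0 then [','] else [])) =
      (PySem.List.pyRange 0 (cs.length : Int) 1).flatMap (fun j => [PySem.List.pyGetD cs j ' ']) := by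
    apply List.flatMap_congr
    intro j hj
    have hj' := PySem.List.mem_pyRange_one.mp hj
    rw [if_neg (by omega)]
    simp
  rw [h1, flatMap_singleton_eq_map, PySem.List.map_pyGetD_pyRange_zero']

theorem take_snoc_comma (cs : List Char) (m : Nat) (hm : m < cs.length) :
    List.take m cs ++ ([cs[m]] ++ [',']) = List.take (m + 1) cs ++ [','] := by
  rw [← List.append_assoc]
  congr 1
  rw [List.take_add_one, List.getElem?_eq_getElem hm]
  simp

theorem aChars_step (cs : List Char) (h : 3 < cs.length) :
    aChars cs = cs.take (if cs.length % 3 = 0 then 3 else cs.length % 3) ++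
      ',' :: aChars (cs.drop (if cs.length % 3 = 0 then 3 else cs.length % 3)) := by
  have key : 1 ≤ (if cs.length % 3 = 0 then 3 else cs.length % 3) ∧
      (if cs.length % 3 = 0 then 3 else cs.length % 3) ≤ 3 ∧
      (cs.length - (if cs.length % 3 = 0 then 3 else cs.length % 3)) % 3 = 0 ∧
      3 ≤ cs.length - (if cs.length % 3 = 0 then 3 else cs.length % 3) := by
    split <;> omega
  set g := if cs.length % 3 = 0 then 3 else cs.length % 3 with hgdef
  obtain ⟨hg1, hg3, hmod, hLg3⟩ := key
  have hgL : g ≤ cs.length := by omega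
  unfold aChars
  simp only [List.length_drop]
  rw [PySem.List.pyRange_one_append 0 (g : Int) (cs.length : Int) (by positivity) (by exact_mod_cast hgL)]
  rw [List.flatMap_append]
  rw [show cs.take g ++ ',' ::
      ((PySem.List.pyRange 0 ((cs.length - g : Nat) : Int) 1).flatMap
        (fun j => [PySem.List.pyGetD (cs.drop g) j ' '] ++
          (if 3 ≤ ((cs.length - g : Nat) : Int) - 1 - j ∧ (((cs.length - g : Nat) : Int) - 1 - j) % 3 = 0
           then [','] else []))) =
      (cs.take g ++ [',']) ++
      ((PySem.List.pyRange 0 ((cs.length - g : Nat) : Int) 1).flatMap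
        (fun j => [PySem.List.pyGetD (cs.drop g) j ' '] ++
          (if 3 ≤ ((cs.length - g : Nat) : Int) - 1 - j ∧ (((cs.length - g : Nat) : Int) - 1 - j) % 3 = 0
           then [','] else []))) from by simp]
  congr 1
  · -- leading group: characters 0..g-1, with a comma after position g-1
    have hsplit : (g : Int) = ((g - 1 : Nat) : Int) + 1 := by omega
    rw [hsplit, PySem.List.pyRange_one_succ_right (by positivity)]
    rw [List.flatMap_append, List.flatMap_singleton]
    have h1 : (PySem.List.pyRange 0 ((g - 1 : Nat) : Int) 1).flatMap
        (fun j => [PySem.List.pyGetD cs j ' '] ++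
          (if 3 ≤ (cs.length : Int) - 1 - j ∧ ((cs.length : Int) - 1 - j) % 3 = 0 then [','] else [])) =
        (PySem.List.pyRange 0 ((g - 1 : Nat) : Int) 1).map (fun j => PySem.List.pyGetD cs j ' ') := by
      rw [← flatMap_singleton_eq_map]
      apply List.flatMap_congr
      intro j hj
      have hj' := PySem.List.mem_pyRange_one.mp hj
      rw [if_neg (by omega)]
      simp
    rw [h1, map_pyGetD_take cs ' ' (g - 1) (by omega)]
    rw [if_pos (by constructor <;> omega)]
    rw [PySem.List.pyGetD_natCast, List.getD_eq_getElem _ _ (by omega)]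
    have e := take_snoc_comma cs (g - 1) (show g - 1 < cs.length by omega)
    rw [Nat.sub_add_cancel hg1] at e
    simpa using e
  · -- remaining groups: reindex j = g + k over the dropped list
    rw [PySem.List.pyRange_one (g : Int) (cs.length : Int)]
    rw [PySem.List.pyRange_zero_natCast (cs.length - g)]
    rw [List.flatMap_map, List.flatMap_map]
    have hLg : ((cs.length : Int) - (g : Int)).toNat = cs.length - g := by omega
    rw [hLg]
    apply List.flatMap_congr
    intro k hk
    have hk' : k < cs.length - g := List.mem_range.mp hk
    congr 1
    · have e1 : ((g : Int) + (k : Int)) = ((g + k : Nat) : Int) := by push_cast; ring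
      rw [e1, PySem.List.pyGetD_natCast, PySem.List.pyGetD_natCast]
      rw [List.getD_eq_getElem _ _ (by omega),
        List.getD_eq_getElem _ _ (by simp only [List.length_drop]; omega)]
      simp [List.getElem_drop]
    · have hiff : (3 ≤ (cs.length : Int) - 1 - ((g : Int) + (k : Int)) ∧
          ((cs.length : Int) - 1 - ((g : Int) + (k : Int))) % 3 = 0) ↔
          (3 ≤ ((cs.length - g : Nat) : Int) - 1 - (k : Int) ∧
          (((cs.length - g : Nat) : Int) - 1 - (k : Int)) % 3 = 0) := by omega
      exact if_congr hiff rfl rfl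

theorem main_eq (cs : List Char) :
    aChars cs = List.intercalate [','] (chunkLoop cs []) := by
  by_cases h : 3 < cs.length
  · rw [chunkLoop_step cs [] h, chunkLoop_acc, List.nil_append, List.singleton_append,
      intercalate_comma_cons _ _ (chunkLoop_nil_ne_nil _),
      ← main_eq (cs.drop (if cs.length % 3 = 0 then 3 else cs.length % 3))]
    exact aChars_step cs h
  · rw [chunkLoop_last cs [] h, List.nil_append, intercalate_comma_single]
    exact aChars_small cs (by omega)
termination_by cs.length
decreasing_by simp only [List.length_drop]; split <;> omega

-- ===== VERDICT (by name: the statement is the Claim_ definition above) =====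
theorem add_comma_spec : Claim_equal_add_comma := by
  intro number _hd
  unfold Spec_add_comma add_comma_alt
  rw [add_comma_eq_aChars, main_eq]
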